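-- pv_equiv track=rewrite | github.com/hellomstars/-0- | SEOHYUN/1111.py | solution
-- ===== SOURCE A (Python) =====
-- def solution(array):
--     answer = 0
--     cnt = []
--     for i in array:
--         cnt.append(array.count(i))
--     if max(cnt)==min(cnt):
--         if len(cnt)==1:
--             answer = max(cnt)
--         else :
--             answer = -1
--     else:
--         answer = max(cnt)
--     return answer
-- ===== SOURCE B (Python) =====
-- def solution(array):
--     counts = {}
--     for x in array:
--         counts[x] = counts.get(x, 0) + 1
--     vals = list(counts.values())
--     mx = max(vals)
--     mn = min(vals)
--     if mx == mn:
--         return mx if len(array) == 1 else -1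
--     return mx
-- ===== Notes on version B (the rewrite author's own statement) =====
-- stated objective: faster
-- what changed: B builds a frequency dictionary in one pass and takes max/min over its values, instead of A's calling array.count(i) for every element (quadratic).
import Mathlib
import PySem

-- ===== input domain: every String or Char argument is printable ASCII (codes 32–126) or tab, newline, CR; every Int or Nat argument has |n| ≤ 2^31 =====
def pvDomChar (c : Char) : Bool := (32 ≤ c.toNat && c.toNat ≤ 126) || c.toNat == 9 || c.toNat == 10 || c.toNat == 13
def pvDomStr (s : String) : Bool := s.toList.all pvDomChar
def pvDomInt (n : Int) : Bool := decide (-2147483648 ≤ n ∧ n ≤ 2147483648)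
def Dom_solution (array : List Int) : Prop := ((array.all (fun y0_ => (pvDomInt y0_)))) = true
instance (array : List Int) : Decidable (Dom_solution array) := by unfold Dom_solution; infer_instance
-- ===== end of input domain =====

-- B replaces A's per-element array.count(i) rescans by one dictionary-counting pass (faster, O(n) vs O(n^2)).

-- ===== PORT A =====
def solution (array : List Int) : Int :=
  let cnt := array.foldl (fun c i => c ++ [(PySem.List.count array i : Int)]) []
  match PySem.List.max? cnt (fun y => y), PySem.List.min? cnt (fun y => y) with
  | some mx, some mn =>
      if mx = mn then (if cnt.length = 1 then mx else -1) else mx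
  | _, _ => 0   -- unreachable under Pre_ (Python: max([]) raises ValueError)

-- ===== PORT B =====
def solution_alt (array : List Int) : Int :=
  let counts := array.foldl (fun d x => d.insert x (d.getD x 0 + 1)) (PySem.Dict.empty : PySem.Dict Int Int)
  let vals := counts.values
  match PySem.List.max? vals (fun y => y) with
  | none => 0   -- unreachable under Pre_ (Python: max([]) raises ValueError)
  | some mx =>
    match PySem.List.min? vals (fun y => y) with
    | none => 0
    | some mn => if mx = mn then (if array.length = 1 then mx else -1) else mx

-- ===== PRECONDITION & SPEC =====
-- A raises ValueError (max of an empty sequence) on the empty list, and so does B.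
def Pre_solution (array : List Int) : Prop := array ≠ []
instance (array : List Int) : Decidable (Pre_solution array) := by unfold Pre_solution; infer_instance
def pvWitness_solution : List Int := ([1, 2, 2])
def Spec_solution (array : List Int) (out : Int) : Prop := out = solution_alt array
instance (array : List Int) (out : Int) : Decidable (Spec_solution array out) := by unfold Spec_solution; infer_instance

-- ===== CLAIM (what is proved, stated in full; the proofs are below) =====
def Claim_equal_solution : Prop := ∀ (array : List Int), Dom_solution array → Pre_solution array → Spec_solution array (solution array)

-- ===== LEMMAS AND PROOFS =====

-- both ports' candidate lists have the same members: the multiplicities of array's elements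
lemma mem_cnt_iff_mem_vals (array : List Int) (v : Int) :
    (v ∈ array.map (fun i => (array.count i : Int)) ↔
     v ∈ (PySem.Dict.counter array).values) := by
  rw [PySem.Dict.values_eq_map_keys _ (PySem.Dict.nodup_keys_counter array) 0,
      PySem.Dict.keys_counter]
  simp only [List.mem_map]
  constructor
  · rintro ⟨i, hi, rfl⟩
    exact ⟨i, (PySem.Set.mem_ofList array i).mpr hi, by simp [PySem.Dict.getD_counter]⟩
  · rintro ⟨k, hk, rfl⟩
    exact ⟨k, (PySem.Set.mem_ofList array k).mp hk, by simp [PySem.Dict.getD_counter]⟩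

-- two nonempty lists with the same members have the same max? (and min?)
lemma max?_eq_of_same_mem (l₁ l₂ : List Int) (h : ∀ v, v ∈ l₁ ↔ v ∈ l₂)
    (h₁ : l₁ ≠ []) (h₂ : l₂ ≠ []) :
    PySem.List.max? l₁ (fun y => y) = PySem.List.max? l₂ (fun y => y) := by
  obtain ⟨m₁, hm₁⟩ := Option.ne_none_iff_exists'.mp
    (fun hc => h₁ ((PySem.List.max?_eq_none_iff l₁ (fun y => y)).mp hc))
  obtain ⟨m₂, hm₂⟩ := Option.ne_none_iff_exists'.mp
    (fun hc => h₂ ((PySem.List.max?_eq_none_iff l₂ (fun y => y)).mp hc))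
  rw [hm₁, hm₂]
  have e₁ := PySem.List.max?_isMax hm₁ m₂ ((h m₂).mpr (PySem.List.max?_mem hm₂))
  have e₂ := PySem.List.max?_isMax hm₂ m₁ ((h m₁).mp (PySem.List.max?_mem hm₁))
  exact congrArg some (le_antisymm e₂ e₁)

lemma min?_eq_of_same_mem (l₁ l₂ : List Int) (h : ∀ v, v ∈ l₁ ↔ v ∈ l₂)
    (h₁ : l₁ ≠ []) (h₂ : l₂ ≠ []) :
    PySem.List.min? l₁ (fun y => y) = PySem.List.min? l₂ (fun y => y) := by
  obtain ⟨m₁, hm₁⟩ := Option.ne_none_iff_exists'.mp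
    (fun hc => h₁ ((PySem.List.min?_eq_none_iff l₁ (fun y => y)).mp hc))
  obtain ⟨m₂, hm₂⟩ := Option.ne_none_iff_exists'.mp
    (fun hc => h₂ ((PySem.List.min?_eq_none_iff l₂ (fun y => y)).mp hc))
  rw [hm₁, hm₂]
  have e₁ := PySem.List.min?_isMin hm₁ m₂ ((h m₂).mpr (PySem.List.min?_mem hm₂))
  have e₂ := PySem.List.min?_isMin hm₂ m₁ ((h m₁).mp (PySem.List.min?_mem hm₁))
  exact congrArg some (le_antisymm e₁ e₂)

-- ===== VERDICT (by name: the statement is the Claim_ definition above) =====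
theorem solution_spec : Claim_equal_solution := by
  intro array _ hpre
  unfold Spec_solution solution solution_alt
  simp only [PySem.List.foldl_append_singleton_eq_map,
      PySem.Dict.foldl_insert_getD_add_one_eq_counter, List.nil_append,
      PySem.List.count_eq]
  have hmemiff := mem_cnt_iff_mem_vals array
  have hcne : array.map (fun i => (array.count i : Int)) ≠ [] := by
    simpa using hpre
  have hvne : (PySem.Dict.counter array).values ≠ [] := by
    intro hc
    rcases List.exists_mem_of_ne_nil _ hcne with ⟨v, hv⟩
    exact absurd ((hmemiff v).mp hv) (by simp [hc])
  have hlen : (array.map (fun i => (array.count i : Int))).length = array.length := by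
    simp
  rw [max?_eq_of_same_mem _ _ hmemiff hcne hvne,
      min?_eq_of_same_mem _ _ hmemiff hcne hvne, hlen]
  cases PySem.List.max? (PySem.Dict.counter array).values (fun y => y) <;>
    cases PySem.List.min? (PySem.Dict.counter array).values (fun y => y) <;> rfl
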